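-- pv_equiv track=rewrite | github.com/GundalaNikhil/DSA | dsa-problems/Arrays/solutions/python/ARR-003-shuttle-shift-blackout.py | shuttle_shift_blackout
-- ===== SOURCE A (Python) =====
-- def shuttle_shift_blackout(arr: list[int], k: int, blackout: set[int]) -> list[int]:
--     """
--     Left rotate non-blackout elements by k.
--     """
--     valid_indices = [i for i in range(len(arr)) if i not in blackout]
--
--     if not valid_indices:
--         return arr
--
--     values = [arr[i] for i in valid_indices]
--     count = len(values)
--     k %= count
--
--     # Left rotate list
--     # values[k:] + values[:k] gives elements shifted left
--     rotated_values = values[k:] + values[:k]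
--
--     # Write back
--     for i, val in zip(valid_indices, rotated_values):
--         arr[i] = val
--
--     return arr
-- ===== SOURCE B (Python) =====
-- def shuttle_shift_blackout(arr: list[int], k: int, blackout: set[int]) -> list[int]:
--     """
--     Left rotate non-blackout elements by k using the in-place three-reversal
--     technique over the valid positions: reverse the first k valid slots, then
--     the rest, then all of them (no values list, no slicing, no extra buffer).
--     """
--     idxs = [i for i in range(len(arr)) if i not in blackout]
--     count = len(idxs)
--     if count == 0:
--         return arr
--     k %= count
--
--     def rev(lo, hi):
--         while lo < hi:
--             a, b = idxs[lo], idxs[hi]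
--             arr[a], arr[b] = arr[b], arr[a]
--             lo += 1
--             hi -= 1
--
--     rev(0, k - 1)
--     rev(k, count - 1)
--     rev(0, count - 1)
--     return arr
-- ===== Notes on version B (the rewrite author's own statement) =====
-- stated objective: alternative
-- what changed: A gathers the non-blackout values into a list, rotates that list by slice concatenation and scatters it back; B never builds a values list: it left-rotates in place with the classic three-reversal technique, swapping endpoint pairs of the valid positions over [0,k), [k,count) and [0,count).
import Mathlib
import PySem

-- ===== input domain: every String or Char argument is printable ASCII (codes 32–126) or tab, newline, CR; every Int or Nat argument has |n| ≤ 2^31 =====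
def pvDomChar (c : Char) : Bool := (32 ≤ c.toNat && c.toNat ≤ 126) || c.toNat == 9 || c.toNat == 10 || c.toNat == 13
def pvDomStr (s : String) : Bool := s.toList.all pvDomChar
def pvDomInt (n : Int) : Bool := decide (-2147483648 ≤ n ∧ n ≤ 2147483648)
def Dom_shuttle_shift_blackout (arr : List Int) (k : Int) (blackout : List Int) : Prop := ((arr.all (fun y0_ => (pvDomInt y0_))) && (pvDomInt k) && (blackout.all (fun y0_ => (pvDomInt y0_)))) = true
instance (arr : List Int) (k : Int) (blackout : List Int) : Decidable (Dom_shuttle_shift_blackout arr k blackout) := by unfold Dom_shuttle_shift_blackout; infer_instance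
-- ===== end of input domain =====

-- B replaces A's gather/slice-rotate/scatter with the in-place three-reversal rotation over the
-- valid positions (objective: alternative; equal cost).  Both Pythons mutate `arr` in place to the
-- same final content; the theorems below are about the returned value.

-- ===== PORT A =====
def shuttle_shift_blackout (arr : List Int) (k : Int) (blackout : List Int) : List Int :=
  let valid_indices := (PySem.List.pyRange 0 (arr.length : Int) 1).filter (fun i => !(blackout.contains i))
  if valid_indices = [] then arr
  else
    let values := valid_indices.map (fun i => PySem.List.pyGetD arr i 0)
    let count : Int := (values.length : Int)
    let k2 := PySem.Int.mod k count
    let rotated_values := PySem.List.slice values (some k2) none ++ PySem.List.slice values none (some k2)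
    (valid_indices.zip rotated_values).foldl (fun a p => PySem.List.pySetD a p.1 p.2) arr

-- ===== PORT B =====
-- the `rev` helper of Source B: while lo < hi swap arr[idxs[lo]], arr[idxs[hi]]; lo += 1; hi -= 1
def pvRevSeg (idxs : List Int) (lo hi : Int) (arr : List Int) : List Int :=
  if lo < hi then
    let a := PySem.List.pyGetD idxs lo 0
    let b := PySem.List.pyGetD idxs hi 0
    let va := PySem.List.pyGetD arr a 0
    let vb := PySem.List.pyGetD arr b 0
    pvRevSeg idxs (lo + 1) (hi - 1) (PySem.List.pySetD (PySem.List.pySetD arr a vb) b va)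
  else arr
termination_by (hi - lo).toNat
decreasing_by omega

def shuttle_shift_blackout_alt (arr : List Int) (k : Int) (blackout : List Int) : List Int :=
  let idxs := (PySem.List.pyRange 0 (arr.length : Int) 1).filter (fun i => !(blackout.contains i))
  let count : Int := (idxs.length : Int)
  if count = 0 then arr
  else
    let k2 := PySem.Int.mod k count
    pvRevSeg idxs 0 (count - 1) (pvRevSeg idxs k2 (count - 1) (pvRevSeg idxs 0 (k2 - 1) arr))

-- ===== PRECONDITION & SPEC =====
def Spec_shuttle_shift_blackout (arr : List Int) (k : Int) (blackout : List Int) (out : List Int) : Prop := out = shuttle_shift_blackout_alt arr k blackout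
instance (arr : List Int) (k : Int) (blackout : List Int) (out : List Int) : Decidable (Spec_shuttle_shift_blackout arr k blackout out) := by unfold Spec_shuttle_shift_blackout; infer_instance

-- ===== CLAIM (what is proved, stated in full; the proofs are below) =====
def Claim_equal_shuttle_shift_blackout : Prop := ∀ (arr : List Int) (k : Int) (blackout : List Int), Dom_shuttle_shift_blackout arr k blackout → Spec_shuttle_shift_blackout arr k blackout (shuttle_shift_blackout arr k blackout)

-- ===== LEMMAS AND PROOFS =====

lemma pvFoldlSet_length (ps : List (Nat × Int)) : ∀ (l : List Int),
    (ps.foldl (fun a p => a.set p.1 p.2) l).length = l.length := by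
  induction ps with
  | nil => intro l; rfl
  | cons p t ih => intro l; simpa using ih (l.set p.1 p.2)

lemma pvScatter_getD (V : List Nat) : ∀ (rot : List Int) (l : List Int), V.Nodup →
    V.length = rot.length → (∀ i ∈ V, i < l.length) → ∀ j : Nat, j < l.length →
    ((V.zip rot).foldl (fun a p => a.set p.1 p.2) l).getD j 0 =
      if j ∈ V then rot.getD (V.idxOf j) 0 else l.getD j 0 := by
  induction V with
  | nil => intro rot l _ _ _ j hj; simp
  | cons i V ih =>
    intro rot l hnd hlen hlt j hj
    cases rot with
    | nil => simp at hlen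
    | cons v rot =>
      have hil : i < l.length := hlt i (by simp)
      have hrec := ih rot (l.set i v) (List.Nodup.of_cons hnd) (by simpa using hlen)
        (by intro a ha; simpa using hlt a (List.mem_cons_of_mem _ ha)) j (by simpa using hj)
      simp only [List.zip_cons_cons, List.foldl_cons]
      rw [hrec]
      by_cases hji : j = i
      · subst hji
        have hjV : j ∉ V := (List.nodup_cons.mp hnd).1
        simp [hjV, hj]
      · have hij : i ≠ j := fun h => hji h.symm
        by_cases hjV : j ∈ V
        · have hidx : List.idxOf j (i :: V) = (List.idxOf j V) + 1 :=
            List.idxOf_cons_ne V hij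
          simp [hjV, hji, hidx]
        · simp [hjV, hji, hij]

lemma pvFoldlSetCast (W : List Nat) : ∀ (rot : List Int) (l : List Int),
    ((W.map (fun a : Nat => (a : Int))).zip rot).foldl
        (fun a p => PySem.List.pySetD a p.1 p.2) l
      = (W.zip rot).foldl (fun a p => a.set p.1 p.2) l := by
  induction W with
  | nil => intro rot l; rfl
  | cons w W ih =>
    intro rot l
    cases rot with
    | nil => rfl
    | cons v rot =>
      simp only [List.map_cons, List.zip_cons_cons, List.foldl_cons, PySem.List.pySetD_natCast]
      exact ih rot _

-- getD through map by cast, with default 0 on both sides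
lemma pvGetD_map_cast (V : List Nat) (m : Nat) (hm : m < V.length) :
    (V.map (fun a : Nat => (a : Int))).getD m 0 = ((V.getD m 0 : Nat) : Int) := by
  simp [List.getD_eq_getElem?_getD, List.getElem?_map, List.getElem?_eq_getElem hm]

lemma pvIdxOf_getD (V : List Nat) (hnd : V.Nodup) (m : Nat) (hm : m < V.length) :
    V.idxOf (V.getD m 0) = m := by
  rw [List.getD_eq_getElem _ _ hm]
  exact List.Nodup.idxOf_getElem hnd m hm

-- the core characterisation of B's swap loop: it reverses the values sitting at
-- positions V[lo..hi] and leaves every other position alone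
lemma pvRevSeg_spec (V : List Nat) (hnd : V.Nodup) :
    ∀ (n : Nat) (lo hi : Int) (arr : List Int), (hi - lo).toNat ≤ n →
    0 ≤ lo → hi < (V.length : Int) → (∀ i ∈ V, i < arr.length) →
    (pvRevSeg (V.map (fun a : Nat => (a : Int))) lo hi arr).length = arr.length ∧
    ∀ j : Nat,
      (pvRevSeg (V.map (fun a : Nat => (a : Int))) lo hi arr).getD j 0 =
        if j ∈ V ∧ lo ≤ (V.idxOf j : Int) ∧ (V.idxOf j : Int) ≤ hi
        then arr.getD (V.getD (lo + hi - (V.idxOf j : Int)).toNat 0) 0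
        else arr.getD j 0 := by
  intro n
  induction n with
  | zero =>
    intro lo hi arr hfuel hlo hhi hbnd
    have hle : ¬ lo < hi := by omega
    rw [pvRevSeg, if_neg hle]
    refine ⟨rfl, ?_⟩
    intro j
    by_cases hc : j ∈ V ∧ lo ≤ (V.idxOf j : Int) ∧ (V.idxOf j : Int) ≤ hi
    · have hlh : lo = hi := by omega
      have hidx : lo + hi - (V.idxOf j : Int) = (V.idxOf j : Int) := by omega
      have hjlt : V.idxOf j < V.length := List.idxOf_lt_length_of_mem hc.1
      rw [if_pos hc, hidx]
      have : V.getD ((V.idxOf j : Int)).toNat 0 = j := by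
        rw [Int.toNat_natCast, List.getD_eq_getElem _ _ hjlt, List.getElem_idxOf]
      rw [this]
    · rw [if_neg hc]
  | succ n ih =>
    intro lo hi arr hfuel hlo hhi hbnd
    by_cases hlt : lo < hi
    · -- the swap step
      have hlolt : lo.toNat < V.length := by omega
      have hhilt : hi.toNat < V.length := by omega
      have hhi0 : 0 ≤ hi := by omega
      set a := V.getD lo.toNat 0 with ha
      set b := V.getD hi.toNat 0 with hb
      have haV : a ∈ V := by rw [ha, List.getD_eq_getElem _ _ hlolt]; exact List.getElem_mem _
      have hbV : b ∈ V := by rw [hb, List.getD_eq_getElem _ _ hhilt]; exact List.getElem_mem _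
      have hidxa : V.idxOf a = lo.toNat := pvIdxOf_getD V hnd lo.toNat hlolt
      have hidxb : V.idxOf b = hi.toNat := pvIdxOf_getD V hnd hi.toNat hhilt
      have hab : a ≠ b := by
        intro h; rw [h] at hidxa; rw [hidxa] at hidxb; omega
      have halt : a < arr.length := hbnd a haV
      have hblt : b < arr.length := hbnd b hbV
      have hga : PySem.List.pyGetD (V.map (fun x : Nat => (x : Int))) lo 0 = (a : Int) := by
        rw [PySem.List.pyGetD_of_nonneg _ _ hlo, pvGetD_map_cast V lo.toNat hlolt]
      have hgb : PySem.List.pyGetD (V.map (fun x : Nat => (x : Int))) hi 0 = (b : Int) := by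
        rw [PySem.List.pyGetD_of_nonneg _ _ hhi0, pvGetD_map_cast V hi.toNat hhilt]
      rw [pvRevSeg, if_pos hlt]
      simp only [hga, hgb, PySem.List.pyGetD_natCast, PySem.List.pySetD_natCast]
      set arr' : List Int := (arr.set a (arr.getD b 0)).set b (arr.getD a 0) with harr'
      have hlen' : arr'.length = arr.length := by simp [harr']
      have hbnd' : ∀ i ∈ V, i < arr'.length := by rw [hlen']; exact hbnd
      have hrec := ih (lo + 1) (hi - 1) arr' (by omega) (by omega) (by omega) hbnd'
      -- values of arr' pointwise
      have harrj : ∀ j : Nat, arr'.getD j 0 =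
          if j = b then arr.getD a 0 else if j = a then arr.getD b 0 else arr.getD j 0 := by
        intro j
        by_cases hjb : j = b
        · subst hjb
          simp [harr', List.getD_eq_getElem?_getD, hblt]
        · have hjb' : b ≠ j := fun h => hjb h.symm
          by_cases hja : j = a
          · subst hja
            simp [harr', List.getD_eq_getElem?_getD, hjb', hjb, halt]
          · have hja' : a ≠ j := fun h => hja h.symm
            simp [harr', List.getD_eq_getElem?_getD, hjb', hja', hjb, hja]
      constructor
      · rw [hrec.1, hlen']
      · intro j
        rw [hrec.2 j]
        by_cases hjV : j ∈ V
        · have hjlt : V.idxOf j < V.length := List.idxOf_lt_length_of_mem hjV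
          have hjval : V.getD (V.idxOf j) 0 = j := by
            rw [List.getD_eq_getElem _ _ hjlt, List.getElem_idxOf]
          by_cases h1 : j ∈ V ∧ lo + 1 ≤ (V.idxOf j : Int) ∧ (V.idxOf j : Int) ≤ hi - 1
          · -- strictly inside: the recursion already placed the reversed value
            obtain ⟨-, hl1, hh1⟩ := id h1
            rw [if_pos h1, if_pos (⟨hjV, by omega, by omega⟩ :
              j ∈ V ∧ lo ≤ (V.idxOf j : Int) ∧ (V.idxOf j : Int) ≤ hi)]
            have hidx : ((lo + 1) + (hi - 1) - (V.idxOf j : Int)).toNat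
                = (lo + hi - (V.idxOf j : Int)).toNat := by omega
            rw [hidx]
            set m := (lo + hi - (V.idxOf j : Int)).toNat with hm
            have hmlt : m < V.length := by omega
            have hVm_a : V.getD m 0 ≠ a := by
              intro h
              have := pvIdxOf_getD V hnd m hmlt
              rw [h, hidxa] at this
              omega
            have hVm_b : V.getD m 0 ≠ b := by
              intro h
              have := pvIdxOf_getD V hnd m hmlt
              rw [h, hidxb] at this
              omega
            rw [harrj (V.getD m 0), if_neg hVm_b, if_neg hVm_a]
          · rw [if_neg h1]
            by_cases h2 : j ∈ V ∧ lo ≤ (V.idxOf j : Int) ∧ (V.idxOf j : Int) ≤ hi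
            · -- an endpoint of the current swap
              obtain ⟨-, hl2, hh2⟩ := id h2
              rw [if_pos h2]
              have hcases : (V.idxOf j : Int) = lo ∨ (V.idxOf j : Int) = hi := by
                by_contra hcon
                exact h1 ⟨hjV, by omega, by omega⟩
              rcases hcases with hc | hc
              · -- j = a, the left endpoint; it receives arr[b]
                have hidxn : V.idxOf j = lo.toNat := by omega
                have hja : j = a := by rw [← hjval, hidxn, ha]
                have hidxe : (lo + hi - (V.idxOf j : Int)).toNat = hi.toNat := by omega
                rw [hidxe, ← hb, harrj j,
                  if_neg (by rw [hja]; exact hab : j ≠ b), if_pos hja]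
              · -- j = b, the right endpoint; it receives arr[a]
                have hidxn : V.idxOf j = hi.toNat := by omega
                have hjb : j = b := by rw [← hjval, hidxn, hb]
                have hidxe : (lo + hi - (V.idxOf j : Int)).toNat = lo.toNat := by omega
                rw [hidxe, ← ha, harrj j, if_pos hjb]
            · -- rank outside [lo,hi]: untouched by this swap
              rw [if_neg h2]
              have hout : ¬ (lo ≤ (V.idxOf j : Int) ∧ (V.idxOf j : Int) ≤ hi) :=
                fun hb2 => h2 ⟨hjV, hb2⟩
              have hja : j ≠ a := by
                intro h
                exact hout (by rw [h, hidxa]; exact ⟨by omega, by omega⟩)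
              have hjb : j ≠ b := by
                intro h
                exact hout (by rw [h, hidxb]; exact ⟨by omega, by omega⟩)
              rw [harrj j, if_neg hjb, if_neg hja]
        · -- j not a valid position at all
          rw [if_neg (by intro h; exact hjV h.1), if_neg (by intro h; exact hjV h.1)]
          have hja : j ≠ a := by intro h; exact hjV (h ▸ haV)
          have hjb : j ≠ b := by intro h; exact hjV (h ▸ hbV)
          rw [harrj j, if_neg hjb, if_neg hja]
    · -- no swap: both sides literal
      rw [pvRevSeg, if_neg hlt]
      refine ⟨rfl, ?_⟩
      intro j
      by_cases hc : j ∈ V ∧ lo ≤ (V.idxOf j : Int) ∧ (V.idxOf j : Int) ≤ hi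
      · have hlh : lo = hi := by omega
        have hidx : lo + hi - (V.idxOf j : Int) = (V.idxOf j : Int) := by omega
        have hjlt : V.idxOf j < V.length := List.idxOf_lt_length_of_mem hc.1
        rw [if_pos hc, hidx]
        have : V.getD ((V.idxOf j : Int)).toNat 0 = j := by
          rw [Int.toNat_natCast, List.getD_eq_getElem _ _ hjlt, List.getElem_idxOf]
        rw [this]
      · rw [if_neg hc]

lemma pvMain (arr : List Int) (k : Int) (blackout : List Int) :
    shuttle_shift_blackout arr k blackout = shuttle_shift_blackout_alt arr k blackout := by
  have hrange : PySem.List.pyRange 0 ((arr.length : Nat) : Int) 1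
      = (List.range arr.length).map (fun a : Nat => (a : Int)) := by
    simpa using PySem.List.pyRange_zero_natCast arr.length
  have hvalid : (PySem.List.pyRange 0 ((arr.length : Nat) : Int) 1).filter
        (fun i => !blackout.contains i)
      = ((List.range arr.length).filter
          (fun a : Nat => !blackout.contains ((a : Nat) : Int))).map (fun a : Nat => (a : Int)) := by
    rw [hrange, List.filter_map]
    rfl
  simp only [shuttle_shift_blackout, shuttle_shift_blackout_alt]
  rw [hvalid]
  set V : List Nat :=
    (List.range arr.length).filter (fun a : Nat => !blackout.contains ((a : Nat) : Int)) with hVdef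
  have hnodup : V.Nodup := (List.nodup_range).filter _
  have hbound : ∀ i ∈ V, i < arr.length := by
    intro i hi
    rw [hVdef] at hi
    exact List.mem_range.mp (List.mem_filter.mp hi).1
  by_cases hVe : V = []
  · simp [hVe]
  · have hVlen : 0 < V.length := List.length_pos_iff.mpr hVe
    have hmne : V.map (fun a : Nat => (a : Int)) ≠ [] := by simp [hVe]
    have hcne : ((V.map (fun a : Nat => (a : Int))).length : Int) ≠ 0 := by
      simp [hVe]
    rw [if_neg hmne, if_neg hcne]
    set vals : List Int := (V.map (fun a : Nat => (a : Int))).map (fun i => PySem.List.pyGetD arr i 0) with hvalsdef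
    have hvals_eq : vals = V.map (fun a : Nat => arr.getD a 0) := by
      rw [hvalsdef, List.map_map]
      apply List.map_congr_left
      intro a _
      simp [Function.comp, PySem.List.pyGetD_natCast]
    have hvlen : vals.length = V.length := by simp [hvalsdef]
    have hcnt : (0 : Int) < (vals.length : Int) := by exact_mod_cast (by omega : 0 < vals.length)
    set c : Int := (V.length : Int) with hcdef
    have hclen : ((V.map (fun a : Nat => (a : Int))).length : Int) = c := by simp [hcdef]
    rw [hclen]
    have hvc : (vals.length : Int) = c := by rw [hvlen]
    set k2 := PySem.Int.mod k c with hk2def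
    have hk0 : 0 ≤ k2 := by
      rw [hk2def]; exact PySem.Int.mod_nonneg k (by omega)
    have hklt : k2 < c := by
      rw [hk2def]; exact PySem.Int.mod_lt k (by omega)
    rw [hvc]
    -- B's three reversals, characterised
    have h1 := pvRevSeg_spec V hnodup (k2 - 1 - 0).toNat 0 (k2 - 1) arr le_rfl (by omega) (by omega) hbound
    set R1 := pvRevSeg (V.map (fun a : Nat => (a : Int))) 0 (k2 - 1) arr with hR1
    have hbnd1 : ∀ i ∈ V, i < R1.length := by rw [h1.1]; exact hbound
    have h2 := pvRevSeg_spec V hnodup (c - 1 - k2).toNat k2 (c - 1) R1 le_rfl hk0 (by omega) hbnd1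
    set R2 := pvRevSeg (V.map (fun a : Nat => (a : Int))) k2 (c - 1) R1 with hR2
    have hbnd2 : ∀ i ∈ V, i < R2.length := by rw [h2.1, h1.1]; exact hbound
    have h3 := pvRevSeg_spec V hnodup (c - 1 - 0).toNat 0 (c - 1) R2 le_rfl (by omega) (by omega) hbnd2
    set R3 := pvRevSeg (V.map (fun a : Nat => (a : Int))) 0 (c - 1) R2 with hR3
    -- A's scatter, characterised
    rw [PySem.List.slice_from vals hk0, PySem.List.slice_to vals hk0, pvFoldlSetCast V]
    set rot : List Int := vals.drop k2.toNat ++ vals.take k2.toNat with hrot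
    have hziplen : V.length = rot.length := by simp [hrot]; omega
    apply List.ext_getElem
    · rw [pvFoldlSet_length, h3.1, h2.1, h1.1]
    · intro j hjA hjB
      have hjn : j < arr.length := by rwa [pvFoldlSet_length] at hjA
      rw [← List.getD_eq_getElem _ 0 hjA, ← List.getD_eq_getElem _ 0 hjB]
      rw [pvScatter_getD V rot arr hnodup hziplen hbound j hjn]
      rw [h3.2 j]
      by_cases hjV : j ∈ V
      · have hr : V.idxOf j < V.length := List.idxOf_lt_length_of_mem hjV
        set r : Nat := V.idxOf j with hrdef
        have hcondall : j ∈ V ∧ (0 : Int) ≤ (r : Int) ∧ (r : Int) ≤ c - 1 := ⟨hjV, by omega, by omega⟩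
        rw [if_pos hjV, if_pos hcondall]
        -- position after the full reversal: rank c-1-r
        set m1 : Nat := (0 + (c - 1) - (r : Int)).toNat with hm1
        have hm1lt : m1 < V.length := by omega
        have hm1V : V.getD m1 0 ∈ V := by
          rw [List.getD_eq_getElem _ _ hm1lt]; exact List.getElem_mem _
        have hm1idx : V.idxOf (V.getD m1 0) = m1 := pvIdxOf_getD V hnodup m1 hm1lt
        rw [h2.2 (V.getD m1 0), hm1idx]
        -- rot on A's side at rank r
        have hrotval : rot.getD r 0 =
            if (r : Int) < c - k2 then vals.getD (k2.toNat + r) 0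
            else vals.getD (r - (vals.length - k2.toNat)) 0 := by
          rw [hrot]
          by_cases hcase : (r : Int) < c - k2
          · have hlt2 : r < (vals.drop k2.toNat).length := by simp; omega
            rw [List.getD_eq_getElem?_getD, List.getElem?_append_left hlt2,
              List.getElem?_drop, ← List.getD_eq_getElem?_getD, if_pos hcase]
          · have hge : (vals.drop k2.toNat).length ≤ r := by simp; omega
            rw [List.getD_eq_getElem?_getD, List.getElem?_append_right hge, if_neg hcase]
            simp only [List.length_drop]
            rw [← List.getD_eq_getElem?_getD, List.getD_eq_getElem?_getD, List.getElem?_take]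
            have : r - (vals.length - k2.toNat) < k2.toNat := by omega
            rw [if_pos this, ← List.getD_eq_getElem?_getD]
        rw [hrotval]
        by_cases hcase : (r : Int) < c - k2
        · -- second pass touches rank m1 (m1 ≥ k2); lands on rank k2 + r, untouched by pass 1
          have hm1ge : k2 ≤ (m1 : Int) := by omega
          rw [if_pos (⟨hm1V, hm1ge, by omega⟩ :
            V.getD m1 0 ∈ V ∧ k2 ≤ ((m1 : Nat) : Int) ∧ ((m1 : Nat) : Int) ≤ c - 1)]
          set m2 : Nat := (k2 + (c - 1) - (m1 : Int)).toNat with hm2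
          have hm2eq : (m2 : Int) = k2 + (r : Int) := by omega
          have hm2lt : m2 < V.length := by omega
          have hm2V : V.getD m2 0 ∈ V := by
            rw [List.getD_eq_getElem _ _ hm2lt]; exact List.getElem_mem _
          have hm2idx : V.idxOf (V.getD m2 0) = m2 := pvIdxOf_getD V hnodup m2 hm2lt
          rw [h1.2 (V.getD m2 0), hm2idx]
          rw [if_neg (show ¬ (V.getD m2 0 ∈ V ∧ (0 : Int) ≤ ((m2 : Nat) : Int) ∧ ((m2 : Nat) : Int) ≤ k2 - 1) from
            by intro h; have hx := h.2.2; omega), if_pos hcase]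
          have hm2eq' : m2 = k2.toNat + r := by omega
          rw [hvals_eq, hm2eq']
          simp [List.getD_eq_getElem?_getD, List.getElem?_map,
            List.getElem?_eq_getElem (by omega : k2.toNat + r < V.length)]
        · -- m1 < k2: pass 2 leaves it, pass 1 maps it to k2-1-m1 = r+k2-c
          have hm1lt2 : (m1 : Int) < k2 := by omega
          rw [if_neg (show ¬ (V.getD m1 0 ∈ V ∧ k2 ≤ ((m1 : Nat) : Int) ∧ ((m1 : Nat) : Int) ≤ c - 1) from
            by intro h; have hx := h.2.1; omega), if_neg hcase]
          rw [h1.2 (V.getD m1 0), hm1idx]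
          rw [if_pos (⟨hm1V, by omega, by omega⟩ :
            V.getD m1 0 ∈ V ∧ (0 : Int) ≤ ((m1 : Nat) : Int) ∧ ((m1 : Nat) : Int) ≤ k2 - 1)]
          set m2 : Nat := (0 + (k2 - 1) - (m1 : Int)).toNat with hm2
          have hm2eq : (m2 : Int) = (r : Int) + k2 - c := by omega
          have hm2lt : m2 < V.length := by omega
          have hre : r - (vals.length - k2.toNat) = m2 := by omega
          rw [hre, hvals_eq]
          simp [List.getD_eq_getElem?_getD, List.getElem?_map,
            List.getElem?_eq_getElem hm2lt]
      · rw [if_neg hjV,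
          if_neg (by intro h; exact hjV h.1)]
        rw [h2.2 j, if_neg (by intro h; exact hjV h.1),
          h1.2 j, if_neg (by intro h; exact hjV h.1)]

-- ===== VERDICT (by name: the statement is the Claim_ definition above) =====
theorem shuttle_shift_blackout_spec : Claim_equal_shuttle_shift_blackout := by
  intro arr k blackout _
  unfold Spec_shuttle_shift_blackout
  exact pvMain arr k blackout
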